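-- pv_equiv track=rewrite | github.com/BlankuApp/JVD | src/word/migrate.py | _convert_translation_to_v2
-- ===== SOURCE A (Python) =====
-- from typing import Dict, List, Any, Optional
--
-- def _convert_translation_to_v2(v1_translation: Dict[str, str]) -> Dict[str, str]:
--     """Convert v0.1.1 translation format to v0.2.0 format"""
--     v2_translation = {}
--
--     # Map v0.1.1 language names to v0.2.0 codes
--     lang_mapping = {
--         "English": "EN",
--         "Persian": "FA",
--         "Nepali": "NE",
--         "Indonesian": "ID",
--         "Filipino": "TL",
--         "Vietnamese": "VI",
--         "Burmese": "MY",
--         "Korean": "KO",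
--         "Hindi": "HI",
--         "Arabic": "AR",
--         "French": "FR",
--         "Spanish": "ES",
--         "Chinese": "ZH",
--         "Bengali": "BN",
--     }
--
--     for lang_name, text in v1_translation.items():
--         if lang_name in lang_mapping and text:
--             v2_translation[lang_mapping[lang_name]] = text
--
--     # Sort by preference order
--     order_list = ["EN", "ID", "ES", "VI", "FR", "NE", "BN", "ZH", "KO", "TL", "MY", "HI", "AR", "FA"]
--     return {key: v2_translation[key] for key in order_list if key in v2_translation}
-- ===== SOURCE B (Python) =====
-- def _convert_translation_to_v2(v1_translation):
--     """Convert v0.1.1 translation format to v0.2.0 format (output-order-driven single pass)."""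
--     lang_mapping = {
--         "English": "EN",
--         "Persian": "FA",
--         "Nepali": "NE",
--         "Indonesian": "ID",
--         "Filipino": "TL",
--         "Vietnamese": "VI",
--         "Burmese": "MY",
--         "Korean": "KO",
--         "Hindi": "HI",
--         "Arabic": "AR",
--         "French": "FR",
--         "Spanish": "ES",
--         "Chinese": "ZH",
--         "Bengali": "BN",
--     }
--     reverse = {code: name for name, code in lang_mapping.items()}
--     order_list = ["EN", "ID", "ES", "VI", "FR", "NE", "BN", "ZH", "KO", "TL", "MY", "HI", "AR", "FA"]
--     return {
--         code: v1_translation[reverse[code]]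
--         for code in order_list
--         if reverse[code] in v1_translation and v1_translation[reverse[code]]
--     }
-- ===== Notes on version B (the rewrite author's own statement) =====
-- stated objective: simpler
-- what changed: Replaced A's input-driven two-pass flow (map v1 entries into a code-keyed dict, then reorder it by order_list) with a reverse code->name lookup table and a single output-order-driven dict comprehension over order_list.
import Mathlib
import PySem

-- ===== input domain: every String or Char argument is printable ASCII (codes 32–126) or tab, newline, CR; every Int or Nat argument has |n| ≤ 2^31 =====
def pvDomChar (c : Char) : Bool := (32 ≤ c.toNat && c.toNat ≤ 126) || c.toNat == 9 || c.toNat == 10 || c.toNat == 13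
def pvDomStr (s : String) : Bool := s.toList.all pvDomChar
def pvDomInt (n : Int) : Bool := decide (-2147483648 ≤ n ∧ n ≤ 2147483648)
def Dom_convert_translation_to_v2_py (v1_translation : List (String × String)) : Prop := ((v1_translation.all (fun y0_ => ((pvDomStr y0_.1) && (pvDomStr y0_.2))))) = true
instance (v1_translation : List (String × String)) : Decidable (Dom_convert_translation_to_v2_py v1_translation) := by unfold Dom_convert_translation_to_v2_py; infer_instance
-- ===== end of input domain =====

-- B replaces A's input-driven map-then-reorder two-pass flow with a reverse lookup table and one
-- output-order-driven pass over the preference list (objective: simpler).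

-- ===== PORT A =====
-- the literal dict `lang_mapping` (distinct literal keys)
def pvLangMap : PySem.Dict String String := PySem.Dict.mk
  [("English", "EN"), ("Persian", "FA"), ("Nepali", "NE"), ("Indonesian", "ID"),
   ("Filipino", "TL"), ("Vietnamese", "VI"), ("Burmese", "MY"), ("Korean", "KO"),
   ("Hindi", "HI"), ("Arabic", "AR"), ("French", "FR"), ("Spanish", "ES"),
   ("Chinese", "ZH"), ("Bengali", "BN")]

def pvOrderList : List String :=
  ["EN", "ID", "ES", "VI", "FR", "NE", "BN", "ZH", "KO", "TL", "MY", "HI", "AR", "FA"]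

-- A's first loop: `for lang_name, text in v1_translation.items(): …`
def pvV2 (v1_translation : List (String × String)) : PySem.Dict String String :=
  v1_translation.foldl
    (fun d p =>
      if pvLangMap.contains p.1 && decide (p.2 ≠ "") then d.insert (pvLangMap.getD p.1 "") p.2 else d)
    PySem.Dict.empty

-- A's final dict comprehension over order_list
def convert_translation_to_v2_py (v1_translation : List (String × String)) : List (String × String) :=
  (pvOrderList.foldl
    (fun d key =>
      if (pvV2 v1_translation).contains key then d.insert key ((pvV2 v1_translation).getD key "") else d)
    PySem.Dict.empty).items

-- ===== PORT B =====
-- `reverse = {code: name for name, code in lang_mapping.items()}`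
def pvRevMap : PySem.Dict String String :=
  pvLangMap.items.foldl (fun d p => d.insert p.2 p.1) PySem.Dict.empty

-- single output-order-driven comprehension
def convert_translation_to_v2_py_alt (v1_translation : List (String × String)) : List (String × String) :=
  (pvOrderList.foldl
    (fun d code =>
      if (PySem.Dict.mk v1_translation).contains (pvRevMap.getD code "")
          && decide ((PySem.Dict.mk v1_translation).getD (pvRevMap.getD code "") "" ≠ "") then
        d.insert code ((PySem.Dict.mk v1_translation).getD (pvRevMap.getD code "") "")
      else d)
    PySem.Dict.empty).items

-- ===== PRECONDITION & SPEC =====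
-- Pre_ excludes association lists with duplicate keys: those do not represent a Python dict
-- (the argument's type), and first-match lookup vs overwrite-insert make the corner anybody's.
def Pre_convert_translation_to_v2_py (v1_translation : List (String × String)) : Prop :=
  (v1_translation.map Prod.fst).Nodup
instance (v1_translation : List (String × String)) : Decidable (Pre_convert_translation_to_v2_py v1_translation) := by unfold Pre_convert_translation_to_v2_py; infer_instance

def pvWitness_convert_translation_to_v2_py : (List (String × String)) :=
  [("English", "hello"), ("Persian", ""), ("Spanish", "hola"), ("Foo", "bar")]

def Spec_convert_translation_to_v2_py (v1_translation : List (String × String)) (out : List (String × String)) : Prop := out = convert_translation_to_v2_py_alt v1_translation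
instance (v1_translation : List (String × String)) (out : List (String × String)) : Decidable (Spec_convert_translation_to_v2_py v1_translation out) := by unfold Spec_convert_translation_to_v2_py; infer_instance

-- ===== CLAIM (what is proved, stated in full; the proofs are below) =====
def Claim_equal_convert_translation_to_v2_py : Prop := ∀ (v1_translation : List (String × String)), Dom_convert_translation_to_v2_py v1_translation → Pre_convert_translation_to_v2_py v1_translation → Spec_convert_translation_to_v2_py v1_translation (convert_translation_to_v2_py v1_translation)

-- ===== LEMMAS AND PROOFS =====

-- lang_mapping is injective: its reverse map recovers the language name from the code
theorem pvLangMap_inj {s c : String} (h : pvLangMap.get? s = some c) :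
    pvRevMap.get? c = some s := by
  have hm := PySem.Dict.mem_items_of_get?_eq_some _ h
  simp only [pvLangMap, List.mem_cons, List.not_mem_nil, or_false, Prod.mk.injEq] at hm
  rcases hm with ⟨rfl,rfl⟩|⟨rfl,rfl⟩|⟨rfl,rfl⟩|⟨rfl,rfl⟩|⟨rfl,rfl⟩|⟨rfl,rfl⟩|⟨rfl,rfl⟩|⟨rfl,rfl⟩|⟨rfl,rfl⟩|⟨rfl,rfl⟩|⟨rfl,rfl⟩|⟨rfl,rfl⟩|⟨rfl,rfl⟩|⟨rfl,rfl⟩ <;> decide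

theorem pvLangMap_inj₂ {s s' c : String} (h : pvLangMap.get? s = some c)
    (h' : pvLangMap.get? s' = some c) : s = s' := by
  have := pvLangMap_inj h
  have := pvLangMap_inj h'
  simp_all

-- what A's first loop puts at `code`: the (unique) entry of v1 whose language maps to `code`,
-- filtered by non-emptiness
theorem pvV2_get (name code : String) (hmap : pvLangMap.get? name = some code) :
    ∀ (v1 : List (String × String)) (d : PySem.Dict String String),
      (v1.map Prod.fst).Nodup →
      (v1.foldl
        (fun d p =>
          if pvLangMap.contains p.1 && decide (p.2 ≠ "") then d.insert (pvLangMap.getD p.1 "") p.2 else d)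
        d).get? code
      = match (PySem.Dict.mk v1).get? name with
        | some t => if t ≠ "" then some t else d.get? code
        | none => d.get? code := by
  intro v1
  induction v1 with
  | nil =>
      intro d _
      simp [PySem.Dict.get?]
  | cons p rest ih =>
      intro d hnd
      simp only [List.map_cons, List.nodup_cons] at hnd
      obtain ⟨hp1, hrest⟩ := hnd
      rw [List.foldl_cons, ih _ hrest, PySem.Dict.get?_mk_cons]
      by_cases hpn : p.1 = name
      · subst hpn
        have hnone : (PySem.Dict.mk rest).get? p.1 = none := by
          rw [PySem.Dict.get?_eq_none_iff_not_mem_keys]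
          simpa [PySem.Dict.keys] using hp1
        have hc : pvLangMap.contains p.1 = true := by
          rw [PySem.Dict.contains_eq_isSome_get?, hmap]; rfl
        have hgd : pvLangMap.getD p.1 "" = code := by
          rw [PySem.Dict.getD_eq_get?_getD, hmap]; rfl
        rw [hnone]
        simp only [hc, hgd, Bool.true_and, beq_self_eq_true, if_true]
        by_cases hne : p.2 = ""
        · simp [hne]
        · simp [hne, PySem.Dict.get?_insert_self]
      · have hstep : (if pvLangMap.contains p.1 && decide (p.2 ≠ "") then
              d.insert (pvLangMap.getD p.1 "") p.2 else d).get? code = d.get? code := by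
          by_cases hc : (pvLangMap.contains p.1 && decide (p.2 ≠ "")) = true
          · rw [if_pos hc]
            have hc1 : pvLangMap.contains p.1 = true := by
              simp only [Bool.and_eq_true] at hc; exact hc.1
            rw [PySem.Dict.contains_eq_isSome_get?] at hc1
            obtain ⟨c', hc'⟩ := Option.isSome_iff_exists.mp hc1
            have hgd : pvLangMap.getD p.1 "" = c' := by
              rw [PySem.Dict.getD_eq_get?_getD, hc']; rfl
            have hne : code ≠ c' := by
              intro hEq
              exact hpn (pvLangMap_inj₂ hc' (hEq ▸ hmap))
            rw [hgd, PySem.Dict.get?_insert_of_ne d p.2 hne]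
          · rw [if_neg hc]
        have hbeq : (p.1 == name) = false := by simpa using hpn
        rw [hbeq, hstep]
        simp only [Bool.false_eq_true, if_false]

-- the two output-building steps agree for any code/name pair of the table
theorem pv_step_eq (v1 : List (String × String)) (hnd : (v1.map Prod.fst).Nodup)
    (name code : String) (hmap : pvLangMap.get? name = some code)
    (hrev : pvRevMap.getD code "" = name) (acc : PySem.Dict String String) :
    (if (pvV2 v1).contains code then acc.insert code ((pvV2 v1).getD code "") else acc)
    = (if (PySem.Dict.mk v1).contains (pvRevMap.getD code "")
          && decide ((PySem.Dict.mk v1).getD (pvRevMap.getD code "") "" ≠ "") then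
        acc.insert code ((PySem.Dict.mk v1).getD (pvRevMap.getD code "") "")
      else acc) := by
  have hget := pvV2_get name code hmap v1 PySem.Dict.empty hnd
  rw [hrev]
  rw [PySem.Dict.contains_eq_isSome_get?, PySem.Dict.getD_eq_get?_getD]
  rw [PySem.Dict.contains_eq_isSome_get?, PySem.Dict.getD_eq_get?_getD]
  rw [show (pvV2 v1).get? code = _ from hget]
  cases h1 : (PySem.Dict.mk v1).get? name with
  | none => simp [PySem.Dict.get?_empty]
  | some t =>
      by_cases ht : t = ""
      · simp [ht, PySem.Dict.get?_empty]
      · simp [ht]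

-- ===== VERDICT (by name: the statement is the Claim_ definition above) =====
theorem convert_translation_to_v2_py_spec : Claim_equal_convert_translation_to_v2_py := by
  intro v1 _ hpre
  unfold Spec_convert_translation_to_v2_py
  unfold convert_translation_to_v2_py convert_translation_to_v2_py_alt
  refine congrArg PySem.Dict.items ?_
  refine PySem.List.foldl_congr_mem _ _ _ _ ?_
  intro acc code hcode
  fin_cases hcode <;>
    exact pv_step_eq v1 hpre _ _ (by decide) rfl acc
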